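-- pv_equiv track=rewrite | github.com/Waranon021/News-Recommended-Code-Lists | Deployment/app.py | analyse_duplicates
-- ===== SOURCE A (Python) =====
-- def analyse_duplicates(recs):
--     article_ids = [str(x.get("article_id", "")).strip() for x in recs]
--     titles = [str(x.get("title", "")).strip().lower() for x in recs]
--     urls = [str(x.get("url", "")).strip().lower() for x in recs]
--
--     dup_ids = len(article_ids) - len(set([x for x in article_ids if x]))
--     dup_titles = len(titles) - len(set([x for x in titles if x]))
--     dup_urls = len(urls) - len(set([x for x in urls if x]))
--
--     return {
--         "dup_ids": dup_ids,
--         "dup_titles": dup_titles,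
--         "dup_urls": dup_urls
--     }
-- ===== SOURCE B (Python) =====
-- def analyse_duplicates(recs):
--     def dup_count(values):
--         seen = set()
--         dups = 0
--         for v in values:
--             if not v or v in seen:
--                 dups += 1
--             else:
--                 seen.add(v)
--         return dups
--     return {
--         "dup_ids": dup_count(str(x.get("article_id", "")).strip() for x in recs),
--         "dup_titles": dup_count(str(x.get("title", "")).strip().lower() for x in recs),
--         "dup_urls": dup_count(str(x.get("url", "")).strip().lower() for x in recs),
--     }
-- ===== Notes on version B (the rewrite author's own statement) =====
-- stated objective: alternative
-- what changed: Replaces A's materialised per-field lists plus 'len(list) - len(set(nonempty))' arithmetic with a single-pass incremental counter per field: a seen-set and a dup counter updated element by element, counting empties and repeats directly.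
import Mathlib
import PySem

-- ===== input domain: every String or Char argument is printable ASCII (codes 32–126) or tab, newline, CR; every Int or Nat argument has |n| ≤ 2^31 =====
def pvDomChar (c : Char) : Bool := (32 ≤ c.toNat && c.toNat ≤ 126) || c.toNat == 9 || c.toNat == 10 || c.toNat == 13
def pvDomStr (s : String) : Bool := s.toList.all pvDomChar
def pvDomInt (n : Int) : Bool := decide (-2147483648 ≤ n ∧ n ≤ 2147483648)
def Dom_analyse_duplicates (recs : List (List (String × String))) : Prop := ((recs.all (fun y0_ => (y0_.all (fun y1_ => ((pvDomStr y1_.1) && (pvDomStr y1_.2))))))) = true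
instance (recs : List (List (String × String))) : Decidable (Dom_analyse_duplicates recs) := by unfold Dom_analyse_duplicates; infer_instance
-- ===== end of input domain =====

-- B replaces A's per-field list/set-comprehension arithmetic with a single-pass seen-set + counter per field (alternative decomposition, same cost).

-- shared helper: x.get(key, "") on a record given as an association list
def pvGet (x : List (String × String)) (k : String) : String :=
  PySem.Dict.getD (PySem.Dict.mk x) k ""

-- ===== PORT A =====
def analyse_duplicates (recs : List (List (String × String))) : List (String × Int) :=
  let article_ids := recs.map (fun x => PySem.Str.strip (pvGet x "article_id"))
  let titles := recs.map (fun x => PySem.Str.lower (PySem.Str.strip (pvGet x "title")))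
  let urls := recs.map (fun x => PySem.Str.lower (PySem.Str.strip (pvGet x "url")))
  let dup_ids : Int := (article_ids.length : Int) - ((PySem.Set.ofList (article_ids.filter (fun s => !(s == "")))).length : Int)
  let dup_titles : Int := (titles.length : Int) - ((PySem.Set.ofList (titles.filter (fun s => !(s == "")))).length : Int)
  let dup_urls : Int := (urls.length : Int) - ((PySem.Set.ofList (urls.filter (fun s => !(s == "")))).length : Int)
  [("dup_ids", dup_ids), ("dup_titles", dup_titles), ("dup_urls", dup_urls)]

-- ===== PORT B =====
-- one step of B's loop: empty or already-seen value counts as a duplicate, otherwise it is added to the seen-set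
def pvDupStep (st : PySem.Set String × Int) (v : String) : PySem.Set String × Int :=
  if v == "" || PySem.Set.contains st.1 v then (st.1, st.2 + 1) else (PySem.Set.add st.1 v, st.2)

def pvDupCount (vs : List String) : Int :=
  (vs.foldl pvDupStep (PySem.Set.empty, 0)).2

def analyse_duplicates_alt (recs : List (List (String × String))) : List (String × Int) :=
  [("dup_ids", pvDupCount (recs.map (fun x => PySem.Str.strip (pvGet x "article_id")))),
   ("dup_titles", pvDupCount (recs.map (fun x => PySem.Str.lower (PySem.Str.strip (pvGet x "title"))))),
   ("dup_urls", pvDupCount (recs.map (fun x => PySem.Str.lower (PySem.Str.strip (pvGet x "url")))))]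

-- ===== PRECONDITION & SPEC =====
def Spec_analyse_duplicates (recs : List (List (String × String))) (out : List (String × Int)) : Prop := out = analyse_duplicates_alt recs
instance (recs : List (List (String × String))) (out : List (String × Int)) : Decidable (Spec_analyse_duplicates recs out) := by unfold Spec_analyse_duplicates; infer_instance

-- ===== CLAIM (what is proved, stated in full; the proofs are below) =====
def Claim_equal_analyse_duplicates : Prop := ∀ (recs : List (List (String × String))), Dom_analyse_duplicates recs → Spec_analyse_duplicates recs (analyse_duplicates recs)

-- ===== LEMMAS AND PROOFS =====

-- loop invariant of B's fold: the seen-set is the running dedup of the nonempty values,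
-- and counter + |seen-set| = start counter + number of values consumed + |start set|
theorem pvDupStep_invariant (vs : List String) (s : PySem.Set String) (d : Int) :
    (vs.foldl pvDupStep (s, d)).1 = PySem.Set.update s (vs.filter (fun v => !(v == ""))) ∧
    ((vs.foldl pvDupStep (s, d)).2 + ((vs.foldl pvDupStep (s, d)).1.length : Int)
      = d + (vs.length : Int) + (s.length : Int)) := by
  induction vs generalizing s d with
  | nil => simp [PySem.Set.update]
  | cons v vs ih =>
    rw [List.foldl_cons, List.filter_cons]
    by_cases he : v = ""
    · subst he
      have hstep : pvDupStep (s, d) "" = (s, d + 1) := by simp [pvDupStep]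
      rw [hstep]
      have h := ih s (d + 1)
      exact ⟨by rw [h.1]; simp, by rw [h.2]; simp only [List.length_cons]; push_cast; omega⟩
    · have hne : (v == "") = false := by simp [he]
      by_cases hc : PySem.Set.contains s v = true
      · have hcond : (v == "" || PySem.Set.contains s v) = true := by
          rw [hc, Bool.or_true]
        have hstep : pvDupStep (s, d) v = (s, d + 1) := by
          simp only [pvDupStep, hcond]; simp
        rw [hstep]
        have h := ih s (d + 1)
        have hv : v ∈ s := by simpa using hc
        refine ⟨?_, by rw [h.2]; simp only [List.length_cons]; push_cast; omega⟩
        rw [h.1]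
        simp [hne, PySem.Set.update_cons, PySem.Set.add_of_mem hv]
      · have hc' : PySem.Set.contains s v = false := by simpa using hc
        have hv' : v ∉ s := by simpa using hc'
        have hcond : (v == "" || PySem.Set.contains s v) = false := by
          rw [hne, hc', Bool.or_self]
        have hstep : pvDupStep (s, d) v = (PySem.Set.add s v, d) := by
          simp only [pvDupStep, hcond]; simp
        rw [hstep]
        have h := ih (PySem.Set.add s v) d
        have hlen : (PySem.Set.add s v).length = s.length + 1 := by
          rw [PySem.Set.add_of_not_mem hv']; simp
        refine ⟨?_, ?_⟩
        · rw [h.1]; simp [hne, PySem.Set.update_cons]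
        · rw [h.2, hlen]; simp only [List.length_cons]; push_cast; omega

-- B's per-field count equals A's arithmetic formula
theorem pvDupCount_eq (vs : List String) :
    pvDupCount vs = (vs.length : Int) - ((PySem.Set.ofList (vs.filter (fun s => !(s == "")))).length : Int) := by
  have h := pvDupStep_invariant vs PySem.Set.empty 0
  unfold pvDupCount
  have hset : (vs.foldl pvDupStep (PySem.Set.empty, 0)).1
      = PySem.Set.ofList (vs.filter (fun v => !(v == ""))) := by
    rw [h.1]; simp [PySem.Set.update, PySem.Set.ofList_eq_foldl]
  have h2 := h.2
  rw [hset] at h2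
  have hemp : (PySem.Set.empty : PySem.Set String).length = 0 := rfl
  rw [hemp] at h2
  omega

-- ===== VERDICT (by name: the statement is the Claim_ definition above) =====
theorem analyse_duplicates_spec : Claim_equal_analyse_duplicates := by
  intro recs _
  unfold Spec_analyse_duplicates analyse_duplicates analyse_duplicates_alt
  simp only [pvDupCount_eq]
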